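-- pv_equiv track=rewrite | github.com/RMWinslow/RMWinslow.github.io | Script/CollapsibleAnimals/animallisttohtml.py | getTextData
-- ===== SOURCE A (Python) =====
-- def getLineData(line):
--     depth = 0
--     while line[:4] == '    ':
--         depth += 1
--         line = line[4:]
--     return depth, line
--
-- def getTextData(textblock):
--     lines = textblock.split('\n')
--     depths = []
--     contents = []
--     for line in lines:
--         depths.append(getLineData(line)[0])
--         contents.append(getLineData(line)[1])
--     return depths, contents
-- ===== SOURCE B (Python) =====
-- def getTextData(textblock):
--     pairs = []
--     for line in textblock.split('\n'):
--         m = len(line) - len(line.lstrip(' '))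
--         d = m // 4
--         pairs.append((d, line[4 * d:]))
--     return [p[0] for p in pairs], [p[1] for p in pairs]
-- ===== Notes on version B (the rewrite author's own statement) =====
-- stated objective: simpler
-- what changed: B computes each line's depth in closed form as (number of leading spaces) // 4 and takes the content as one slice line[4*d:], in a single pass over the lines, instead of A's repeated 4-character prefix stripping and calling getLineData twice per line.
import Mathlib
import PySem

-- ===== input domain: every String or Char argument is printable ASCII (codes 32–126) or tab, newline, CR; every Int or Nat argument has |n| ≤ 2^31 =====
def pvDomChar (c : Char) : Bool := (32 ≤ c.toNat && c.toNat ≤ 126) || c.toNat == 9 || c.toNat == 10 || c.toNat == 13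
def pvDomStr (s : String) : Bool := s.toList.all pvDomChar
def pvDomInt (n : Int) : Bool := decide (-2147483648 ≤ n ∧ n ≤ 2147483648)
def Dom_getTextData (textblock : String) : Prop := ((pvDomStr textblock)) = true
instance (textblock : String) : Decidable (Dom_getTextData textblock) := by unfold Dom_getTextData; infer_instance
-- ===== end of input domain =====

-- B computes each line's depth in closed form as (leading spaces) // 4 and slices the content once
-- per line, in a single pass, instead of A's repeated 4-character prefix stripping (objective: simpler).


-- ===== PORT A =====
-- getLineData: depth = 0; while line[:4] == '    ': depth += 1; line = line[4:]
def getLineDataA (line : List Char) : Int × List Char :=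
  if h : PySem.List.slice line none (some 4) = [' ', ' ', ' ', ' '] then
    let p := getLineDataA (PySem.List.slice line (some 4) none)
    (p.1 + 1, p.2)
  else (0, line)
termination_by line.length
decreasing_by
  have ht : PySem.List.slice line none (some 4) = line.take 4 := by
    rw [PySem.List.slice_to line (by decide : (0:Int) ≤ 4)]; rfl
  have h4 : line.length ≥ 4 := by
    have := congrArg List.length h
    rw [ht] at this; simp at this; omega
  rw [PySem.List.slice_from line (by decide : (0:Int) ≤ 4)]
  show (List.drop (Int.toNat 4) line).length < line.length
  simp; omega

-- for line in textblock.split('\n'): depths.append(getLineData(line)[0]); contents.append(getLineData(line)[1])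
def getTextData (textblock : String) : List Int × List String :=
  let lines := PySem.Chars.splitOn textblock.toList "\n".toList
  lines.foldl (fun acc line =>
    (acc.1 ++ [(getLineDataA line).1], acc.2 ++ [String.ofList (getLineDataA line).2])) ([], [])

-- ===== PORT B =====
-- per line: m = len(line) - len(line.lstrip(' ')); d = m // 4; pair (d, line[4*d:])
-- line.lstrip(' ') is ported by hand as dropWhile (· == ' '): exact (drops leading ' ' only).
def lineDataB (line : List Char) : Int × List Char :=
  let m : Int := (line.length : Int) - ((line.dropWhile (fun c => c == ' ')).length : Int)
  let d := PySem.Int.floordiv m 4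
  (d, PySem.List.slice line (some (4 * d)) none)

def getTextData_alt (textblock : String) : List Int × List String :=
  let pairs := (PySem.Chars.splitOn textblock.toList "\n".toList).map lineDataB
  (pairs.map Prod.fst, pairs.map (fun p => String.ofList p.2))

-- ===== PRECONDITION & SPEC =====
def Spec_getTextData (textblock : String) (out : List Int × List String) : Prop := out = getTextData_alt textblock
instance (textblock : String) (out : List Int × List String) : Decidable (Spec_getTextData textblock out) := by unfold Spec_getTextData; infer_instance

-- ===== CLAIM (what is proved, stated in full; the proofs are below) =====
def Claim_equal_getTextData : Prop := ∀ (textblock : String), Dom_getTextData textblock → Spec_getTextData textblock (getTextData textblock)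

-- ===== LEMMAS AND PROOFS =====

-- closed form for A's per-line while loop
lemma getLineDataA_eq (cs : List Char) :
    getLineDataA cs =
      ((((cs.takeWhile (fun c => c == ' ')).length / 4 : Nat) : Int),
        cs.drop (4 * ((cs.takeWhile (fun c => c == ' ')).length / 4))) := by
  fun_induction getLineDataA cs with
  | case1 cs h p ih =>
    rw [PySem.List.slice_to cs (by decide : (0:Int) ≤ 4)] at h
    rw [PySem.List.slice_from cs (by decide : (0:Int) ≤ 4)] at ih
    rcases cs with _|⟨a, _|⟨b, _|⟨c, _|⟨d, rest⟩⟩⟩⟩ <;> simp_all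
    have hp : p = getLineDataA rest := by
      show getLineDataA (PySem.List.slice _ (some 4) none) = _
      rw [PySem.List.slice_from _ (by decide : (0:Int) ≤ 4)]; rfl
    rw [hp, ih]
    refine ⟨by omega, ?_⟩
    rw [show 4 * (((List.takeWhile (fun c => c == ' ') rest).length + 1 + 1 + 1 + 1) / 4)
        = (4 * ((List.takeWhile (fun c => c == ' ') rest).length / 4)) + 1 + 1 + 1 + 1 by omega]
    simp [List.drop_succ_cons]
  | case2 cs h =>
    rw [PySem.List.slice_to cs (by decide : (0:Int) ≤ 4)] at h
    have ht3 : (cs.takeWhile (fun c => c == ' ')).length ≤ 3 := by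
      rcases cs with _|⟨a, _|⟨b, _|⟨c, _|⟨d, rest⟩⟩⟩⟩
      · simp
      · exact le_trans (List.takeWhile_sublist _).length_le (by simp)
      · exact le_trans (List.takeWhile_sublist _).length_le (by simp)
      · exact le_trans (List.takeWhile_sublist _).length_le (by simp)
      · by_cases ha : a = ' '
        · by_cases hb : b = ' '
          · by_cases hc : c = ' '
            · by_cases hd : d = ' '
              · exfalso; apply h; subst ha hb hc hd; rfl
              · subst ha hb hc; simp [hd]
            · subst ha hb; simp [hc]
          · subst ha; simp [hb]
        · simp [ha]
    have h0 : (cs.takeWhile (fun c => c == ' ')).length / 4 = 0 := by omega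
    simp [h0]

-- closed form for B's per-line computation: the same pair
lemma lineDataB_eq (cs : List Char) :
    lineDataB cs =
      ((((cs.takeWhile (fun c => c == ' ')).length / 4 : Nat) : Int),
        cs.drop (4 * ((cs.takeWhile (fun c => c == ' ')).length / 4))) := by
  simp only [lineDataB]
  have htle : (cs.takeWhile (fun c => c == ' ')).length ≤ cs.length :=
    (List.takeWhile_sublist _).length_le
  have hsplit : (cs.takeWhile (fun c => c == ' ')).length
      + (cs.dropWhile (fun c => c == ' ')).length = cs.length := by
    conv_rhs => rw [← List.takeWhile_append_dropWhile (p := fun c => c == ' ') (l := cs)]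
    rw [List.length_append]
  have hm : (cs.length : Int) - ((cs.dropWhile (fun c => c == ' ')).length : Int)
      = ((cs.takeWhile (fun c => c == ' ')).length : Int) := by omega
  rw [hm]
  have hd : PySem.Int.floordiv ((cs.takeWhile (fun c => c == ' ')).length : Int) 4
      = (((cs.takeWhile (fun c => c == ' ')).length / 4 : Nat) : Int) := by
    exact_mod_cast PySem.Int.floordiv_natCast (cs.takeWhile (fun c => c == ' ')).length 4
  rw [hd]
  rw [PySem.List.slice_from _
    (by positivity : (0:Int) ≤ 4 * (((cs.takeWhile (fun c => c == ' ')).length / 4 : Nat) : Int))]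
  congr 1

-- ===== VERDICT (by name: the statement is the Claim_ definition above) =====
theorem getTextData_spec : Claim_equal_getTextData := by
  intro tb _
  unfold Spec_getTextData getTextData getTextData_alt
  rw [PySem.List.foldl_prod_mk (fun s e => s ++ [(getLineDataA e).1])
      (fun s e => s ++ [String.ofList (getLineDataA e).2]) _ [] [],
    PySem.List.foldl_append_singleton_eq_map, PySem.List.foldl_append_singleton_eq_map]
  simp [getLineDataA_eq, lineDataB_eq, List.map_map, Function.comp]
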